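-- pv_equiv track=rewrite | github.com/Memmi36/GHER-GT | graph/tools.py | get_edgeset
-- ===== SOURCE A (Python) =====
-- def get_groups(dataset='Briareo', CoM=0):
--     groups  =[]
--
--     if dataset == 'Briareo':
--         if CoM == 0:
--             groups.append([0])
--             groups.append([1, 2])
--             groups.append([18, 14, 10, 6, 3])
--             groups.append([19, 15, 11, 7, 4])
--             groups.append([20, 16, 12, 8, 5])
--             groups.append([21, 17, 13, 9])
--
--         ## Center of mass : 1
--         elif CoM == 1:
--             groups.append([1])
--             groups.append([0, 6, 10, 14, 18])
--             groups.append([2, 7, 11, 15, 19])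
--             groups.append([3, 8, 12, 16, 20])
--             groups.append([4, 9, 13, 17, 21])
--             groups.append([5])
--
--         ## Center of mass : 9
--         elif CoM == 9:
--             groups.append([9])
--             groups.append([8])
--             groups.append([7])
--             groups.append([6])
--             groups.append([1])
--             groups.append([0, 10, 14, 18])
--             groups.append([2, 11, 15, 19])
--             groups.append([3, 12, 16, 20])
--             groups.append([4, 13, 17, 21])
--             groups.append([5])
--
--         else:
--             raise ValueError()
--
--     return groups
--
-- def get_edgeset(dataset='Briareo', CoM=0):
--     groups = get_groups(dataset=dataset, CoM=CoM)
--
--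
--     identity = []
--     forward_hierarchy = []
--     reverse_hierarchy = []
--
--     for i in range(len(groups) - 1):
--         self_link = groups[i] + groups[i + 1]
--         self_link = [(i, i) for i in self_link]
--         identity.append(self_link)
--         forward_g = []
--         for j in groups[i]:
--             for k in groups[i + 1]:
--                 forward_g.append((j, k))
--         forward_hierarchy.append(forward_g)
--
--         reverse_g = []
--         for j in groups[-1 - i]:
--             for k in groups[-2 - i]:
--                 reverse_g.append((j, k))
--         reverse_hierarchy.append(reverse_g)
--
--     edges = []
--     for i in range(len(groups) - 1):
--         edges.append([identity[i], forward_hierarchy[i], reverse_hierarchy[-1 - i]])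
--
--     return edges
-- ===== SOURCE B (Python) =====
-- GROUPS = {
--     ('Briareo', 0): [[0], [1, 2], [18, 14, 10, 6, 3], [19, 15, 11, 7, 4],
--                      [20, 16, 12, 8, 5], [21, 17, 13, 9]],
--     ('Briareo', 1): [[1], [0, 6, 10, 14, 18], [2, 7, 11, 15, 19],
--                      [3, 8, 12, 16, 20], [4, 9, 13, 17, 21], [5]],
--     ('Briareo', 9): [[9], [8], [7], [6], [1], [0, 10, 14, 18],
--                      [2, 11, 15, 19], [3, 12, 16, 20], [4, 13, 17, 21], [5]],
-- }
--
--
-- def _cross(a, b):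
--     # cross product by flat arithmetic indexing instead of nested loops
--     n = len(b)
--     return [(a[t // n], b[t % n]) for t in range(len(a) * n)]
--
--
-- def _build(gs):
--     # recursion over the layer list, emitting one triple per adjacent pair
--     if len(gs) < 2:
--         return []
--     a, b = gs[0], gs[1]
--     return [[[(x, x) for x in a + b], _cross(a, b), _cross(b, a)]] + _build(gs[1:])
--
--
-- def get_edgeset(dataset='Briareo', CoM=0):
--     if dataset == 'Briareo' and (dataset, CoM) not in GROUPS:
--         raise ValueError()
--     return _build(GROUPS.get((dataset, CoM), []))
-- ===== Notes on version B (the rewrite author's own statement) =====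
-- stated objective: alternative
-- what changed: B discards A's three staged parallel lists and the reverse-index recombination: it recurses over the layer list, emitting each triple directly, and computes each cross product by flat arithmetic indexing (a[t//n], b[t%n]) over a single range instead of nested loops.
import Mathlib
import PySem

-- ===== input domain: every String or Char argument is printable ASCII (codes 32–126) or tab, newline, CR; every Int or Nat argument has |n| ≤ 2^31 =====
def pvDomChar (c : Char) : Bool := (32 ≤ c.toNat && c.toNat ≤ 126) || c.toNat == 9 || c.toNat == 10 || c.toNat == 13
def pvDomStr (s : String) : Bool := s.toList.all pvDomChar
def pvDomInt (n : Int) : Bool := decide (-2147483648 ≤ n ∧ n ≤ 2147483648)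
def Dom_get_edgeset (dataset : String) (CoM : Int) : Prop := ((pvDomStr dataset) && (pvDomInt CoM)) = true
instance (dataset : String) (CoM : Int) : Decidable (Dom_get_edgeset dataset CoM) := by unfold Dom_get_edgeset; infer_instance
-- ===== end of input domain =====

-- B recurses over the layer list emitting each triple directly, with cross products by flat
-- arithmetic indexing, instead of A's three staged lists recombined by reverse indexing; objective: alternative.

-- ===== PORT A =====
-- get_groups: the if/elif chain of appends, as the literal list it builds.
def get_groups (dataset : String) (CoM : Int) : List (List Int) :=
  if dataset = "Briareo" then
    if CoM = 0 then
      [[0], [1, 2], [18, 14, 10, 6, 3], [19, 15, 11, 7, 4], [20, 16, 12, 8, 5], [21, 17, 13, 9]]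
    else if CoM = 1 then
      [[1], [0, 6, 10, 14, 18], [2, 7, 11, 15, 19], [3, 8, 12, 16, 20], [4, 9, 13, 17, 21], [5]]
    else if CoM = 9 then
      [[9], [8], [7], [6], [1], [0, 10, 14, 18], [2, 11, 15, 19], [3, 12, 16, 20], [4, 13, 17, 21], [5]]
    else []  -- Python raises ValueError here; excluded by Pre_get_edgeset
  else []

def get_edgeset (dataset : String) (CoM : Int) : List (List (List (Int × Int))) :=
  let groups := get_groups dataset CoM
  let n : Int := groups.length
  -- first loop: build identity, forward_hierarchy, reverse_hierarchy together
  let s := (PySem.List.pyRange 0 (n - 1) 1).foldl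
    (fun (s : List (List (Int × Int)) × List (List (Int × Int)) × List (List (Int × Int))) i =>
      let (identity, forward_h, reverse_h) := s
      let self_link := PySem.List.pyGetD groups i [] ++ PySem.List.pyGetD groups (i + 1) []
      let self_link := self_link.map (fun x => (x, x))
      let forward_g := (PySem.List.pyGetD groups i []).foldl
        (fun fg j => (PySem.List.pyGetD groups (i + 1) []).foldl
          (fun fg k => fg ++ [(j, k)]) fg) []
      let reverse_g := (PySem.List.pyGetD groups (-1 - i) []).foldl
        (fun rg j => (PySem.List.pyGetD groups (-2 - i) []).foldl
          (fun rg k => rg ++ [(j, k)]) rg) []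
      (identity ++ [self_link], forward_h ++ [forward_g], reverse_h ++ [reverse_g]))
    ([], [], [])
  let (identity, forward_h, reverse_h) := s
  -- second loop: recombine with reverse_hierarchy[-1 - i]
  (PySem.List.pyRange 0 (n - 1) 1).foldl
    (fun edges i =>
      edges ++ [[PySem.List.pyGetD identity i [], PySem.List.pyGetD forward_h i [],
                 PySem.List.pyGetD reverse_h (-1 - i) []]]) []

-- ===== PORT B =====
def pvGroupsTable : PySem.Dict (String × Int) (List (List Int)) :=
  PySem.Dict.mk  -- literal dict, keys distinct
    [ (("Briareo", 0), [[0], [1, 2], [18, 14, 10, 6, 3], [19, 15, 11, 7, 4], [20, 16, 12, 8, 5], [21, 17, 13, 9]]),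
      (("Briareo", 1), [[1], [0, 6, 10, 14, 18], [2, 7, 11, 15, 19], [3, 8, 12, 16, 20], [4, 9, 13, 17, 21], [5]]),
      (("Briareo", 9), [[9], [8], [7], [6], [1], [0, 10, 14, 18], [2, 11, 15, 19], [3, 12, 16, 20], [4, 13, 17, 21], [5]]) ]

-- _cross: cross product by flat arithmetic indexing over one range, a[t//n], b[t%n]
def pvCross (a b : List Int) : List (Int × Int) :=
  let n : Int := b.length
  (PySem.List.pyRange 0 (a.length * n) 1).map
    (fun t => (PySem.List.pyGetD a (PySem.Int.floordiv t n) 0,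
               PySem.List.pyGetD b (PySem.Int.mod t n) 0))

-- _build: recursion over the layer list (gs[1:] is the tail)
def pvBuild : List (List Int) → List (List (List (Int × Int)))
  | [] => []
  | [_] => []
  | a :: b :: rest =>
      [[(a ++ b).map (fun x => (x, x)), pvCross a b, pvCross b a]] ++ pvBuild (b :: rest)

def get_edgeset_alt (dataset : String) (CoM : Int) : List (List (List (Int × Int))) :=
  -- Source B's guard 'raise ValueError' fires only outside Pre_get_edgeset; omitted here.
  pvBuild ((pvGroupsTable.get? (dataset, CoM)).getD [])

-- ===== PRECONDITION & SPEC =====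
-- A raises ValueError exactly when dataset == 'Briareo' and CoM is not 0, 1 or 9; Pre_ excludes those inputs.
def Pre_get_edgeset (dataset : String) (CoM : Int) : Prop :=
  dataset = "Briareo" → (CoM = 0 ∨ CoM = 1 ∨ CoM = 9)
instance (dataset : String) (CoM : Int) : Decidable (Pre_get_edgeset dataset CoM) := by
  unfold Pre_get_edgeset; infer_instance

def pvWitness_get_edgeset : String × Int := ("Briareo", 0)

def Spec_get_edgeset (dataset : String) (CoM : Int) (out : List (List (List (Int × Int)))) : Prop := out = get_edgeset_alt dataset CoM
instance (dataset : String) (CoM : Int) (out : List (List (List (Int × Int)))) : Decidable (Spec_get_edgeset dataset CoM out) := by unfold Spec_get_edgeset; infer_instance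

-- ===== CLAIM (what is proved, stated in full; the proofs are below) =====
def Claim_equal_get_edgeset : Prop := ∀ (dataset : String) (CoM : Int), Dom_get_edgeset dataset CoM → Pre_get_edgeset dataset CoM → Spec_get_edgeset dataset CoM (get_edgeset dataset CoM)

-- ===== LEMMAS AND PROOFS =====

-- On any input whose groups list is empty, both ports return [].
theorem pv_empty (dataset : String) (CoM : Int)
    (hA : get_groups dataset CoM = [])
    (hB : pvGroupsTable.get? (dataset, CoM) = none) :
    get_edgeset dataset CoM = get_edgeset_alt dataset CoM := by
  simp [get_edgeset, get_edgeset_alt, hA, hB, pvBuild, PySem.List.pyRange]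

-- ===== VERDICT (by name: the statement is the Claim_ definition above) =====
theorem get_edgeset_spec : Claim_equal_get_edgeset := by
  intro dataset CoM _ hpre
  unfold Spec_get_edgeset
  by_cases h : dataset = "Briareo"
  · subst h
    rcases hpre rfl with h0 | h1 | h9 <;> subst_vars <;> decide
  · apply pv_empty
    · simp [get_groups, h]
    · have h' : ¬("Briareo" = dataset) := fun e => h e.symm
      simp [pvGroupsTable, Prod.ext_iff, h', PySem.Dict.get?]
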